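-- pv_equiv track=rewrite | github.com/alexanderlopez/lambda_calculus_evaluator | evaluator.py | mustTrim
-- ===== SOURCE A (Python) =====
-- def mustTrim(string):
--     if string[0] != '(':
--         return False
--
--     depth = 0
--
--     for x in range(len(string) - 1):
--         curChar = string[x]
--         match curChar:
--             case '(':
--                 depth += 1
--             case ')':
--                 depth -= 1
--
--         if depth == 0:
--             return False
--
--     return True
-- ===== SOURCE B (Python) =====
-- def mustTrim(string):
--     if string[0] != '(':
--         return False
--     total, lowest = _scan(string, 0, len(string) - 1)
--     return lowest >= 1
--
--
-- def _scan(s, lo, hi):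
--     # Divide and conquer over s[lo:hi]: returns (total balance of the segment,
--     # minimum running balance over its nonempty prefixes).  An empty segment has
--     # no nonempty prefix; its minimum is "+infinity", represented by len(s) + 1,
--     # which exceeds every reachable balance.
--     if hi - lo == 0:
--         return (0, len(s) + 1)
--     if hi - lo == 1:
--         c = s[lo]
--         d = 1 if c == '(' else (-1 if c == ')' else 0)
--         return (d, d)
--     mid = (lo + hi) // 2
--     t1, m1 = _scan(s, lo, mid)
--     t2, m2 = _scan(s, mid, hi)
--     return (t1 + t2, min(m1, t1 + m2))
-- ===== Notes on version B (the rewrite author's own statement) =====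
-- stated objective: alternative
-- what changed: Replaces A's early-exit linear depth-counter scan with a divide-and-conquer segment combine: each half of the scanned region is summarised as a pair (total balance, minimum prefix balance), summaries are merged by (t1+t2, min(m1, t1+m2)), and the answer is whether the minimum prefix balance stays positive.
import Mathlib
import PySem

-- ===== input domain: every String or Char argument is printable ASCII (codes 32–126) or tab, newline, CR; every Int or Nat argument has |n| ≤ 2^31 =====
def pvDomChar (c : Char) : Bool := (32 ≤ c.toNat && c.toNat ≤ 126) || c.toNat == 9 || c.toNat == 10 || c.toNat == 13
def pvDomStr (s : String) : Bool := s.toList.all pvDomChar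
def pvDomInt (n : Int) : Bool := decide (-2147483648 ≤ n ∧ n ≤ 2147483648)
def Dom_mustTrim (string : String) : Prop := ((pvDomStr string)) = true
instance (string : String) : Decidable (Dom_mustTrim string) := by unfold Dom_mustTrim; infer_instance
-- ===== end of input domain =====

-- B replaces A's early-exit depth-counter scan with a divide-and-conquer (total balance, min prefix balance) segment combine; objective: alternative. Pre_ excludes only the empty string, on which both raise IndexError.


-- ===== PORT A =====
-- A's loop: for x in range(len-1): update depth per char, return False the moment depth == 0
def mustTrimLoopA : List Char → Int → Bool
  | [], _ => true
  | c :: rest, depth =>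
    let d := if c = '(' then depth + 1 else if c = ')' then depth - 1 else depth
    if d = 0 then false else mustTrimLoopA rest d

def mustTrim (string : String) : Bool :=
  match string.toList with
  | [] => false  -- string[0] raises IndexError in Python; excluded by Pre_
  | c :: _ =>
    if c ≠ '(' then false
    else mustTrimLoopA (string.toList.take (string.toList.length - 1)) 0

-- ===== PORT B =====
-- B's helper _scan: divide and conquer over s[lo:hi], returning
-- (total balance, minimum running balance over nonempty prefixes; len(s)+1 as +infinity for the empty segment)
def mustTrimScan (l : List Char) (lo hi : Nat) : Int × Int :=
  if hi - lo = 0 then (0, (l.length : Int) + 1)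
  else if hi - lo = 1 then
    let c := l.getD lo ' '  -- s[lo]; every call keeps lo < len(s), so this is Python's s[lo]
    let d : Int := if c = '(' then 1 else if c = ')' then -1 else 0
    (d, d)
  else
    let mid := (lo + hi) / 2
    let p := mustTrimScan l lo mid
    let q := mustTrimScan l mid hi
    (p.1 + q.1, min p.2 (p.1 + q.2))
termination_by hi - lo
decreasing_by all_goals omega

def mustTrim_alt (string : String) : Bool :=
  match string.toList with
  | [] => false  -- string[0] raises IndexError in Python; excluded by Pre_
  | c :: _ =>
    if c ≠ '(' then false
    else decide (1 ≤ (mustTrimScan string.toList 0 (string.toList.length - 1)).2)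

-- ===== PRECONDITION & SPEC =====
-- Pre_ excludes only the empty string, on which A (and B) raise IndexError at string[0].
def Pre_mustTrim (string : String) : Prop := string ≠ ""
instance (string : String) : Decidable (Pre_mustTrim string) := by unfold Pre_mustTrim; infer_instance
def pvWitness_mustTrim : String := "(a)"
def Spec_mustTrim (string : String) (out : Bool) : Prop := out = mustTrim_alt string
instance (string : String) (out : Bool) : Decidable (Spec_mustTrim string out) := by unfold Spec_mustTrim; infer_instance

-- ===== CLAIM (what is proved, stated in full; the proofs are below) =====
def Claim_equal_mustTrim : Prop := ∀ (string : String), Dom_mustTrim string → Pre_mustTrim string → Spec_mustTrim string (mustTrim string)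

-- ===== LEMMAS AND PROOFS =====
def pvDelta (c : Char) : Int := if c = '(' then 1 else if c = ')' then -1 else 0

def sumDelta (m : List Char) : Int := (m.map pvDelta).sum

-- minimum running balance over nonempty prefixes of c :: m
def minPre : Char → List Char → Int
  | c, [] => pvDelta c
  | c, d :: m => min (pvDelta c) (pvDelta c + minPre d m)

def minPreL : List Char → Int
  | [] => 0
  | c :: m => minPre c m

theorem pvDelta_mem : ∀ c, -1 ≤ pvDelta c ∧ pvDelta c ≤ 1 := by
  intro c; unfold pvDelta; split_ifs <;> omega

theorem loopA_cons (c : Char) (m : List Char) (d : Int) :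
    mustTrimLoopA (c :: m) d = if d + pvDelta c = 0 then false else mustTrimLoopA m (d + pvDelta c) := by
  have hupd : (if c = '(' then d + 1 else if c = ')' then d - 1 else d) = d + pvDelta c := by
    unfold pvDelta; split_ifs <;> omega
  simp only [mustTrimLoopA]
  rw [hupd]

theorem minPre_append : ∀ (a : List Char) (c d : Char) (b : List Char),
    minPre c (a ++ d :: b) = min (minPre c a) (sumDelta (c :: a) + minPre d b) := by
  intro a
  induction a with
  | nil => intro c d b; simp [minPre, sumDelta]
  | cons e a' ih =>
    intro c d b
    simp only [List.cons_append, minPre, ih]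
    simp [sumDelta] at *
    omega

theorem minPreL_append (a b : List Char) (ha : a ≠ []) (hb : b ≠ []) :
    minPreL (a ++ b) = min (minPreL a) (sumDelta a + minPreL b) := by
  cases a with
  | nil => exact absurd rfl ha
  | cons c a' =>
    cases b with
    | nil => exact absurd rfl hb
    | cons d b' => simpa [minPreL] using minPre_append a' c d b'

theorem scan_spec : ∀ (n : Nat) (l : List Char) (lo hi : Nat), hi - lo = n → lo < hi → hi ≤ l.length →
    mustTrimScan l lo hi =
      (sumDelta ((l.drop lo).take (hi - lo)), minPreL ((l.drop lo).take (hi - lo))) := by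
  intro n
  induction n using Nat.strong_induction_on with
  | _ n ih =>
    intro l lo hi hn hlt hle
    rw [mustTrimScan]
    by_cases h0 : hi - lo = 0
    · exact absurd h0 (by omega)
    · rw [if_neg h0]
      by_cases h1 : hi - lo = 1
      · rw [if_pos h1]
        have hlo : lo < l.length := by omega
        have hdrop : l.drop lo = l[lo] :: l.drop (lo + 1) := List.drop_eq_getElem_cons hlo
        have hseg : (l.drop lo).take 1 = [l[lo]] := by rw [hdrop, List.take_succ_cons, List.take_zero]
        rw [h1, hseg, List.getD_eq_getElem l ' ' hlo]
        simp [sumDelta, minPreL, minPre, pvDelta]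
      · rw [if_neg h1]
        have h2 : 2 ≤ hi - lo := by omega
        have hml : lo < (lo + hi) / 2 := by omega
        have hmh : (lo + hi) / 2 < hi := by omega
        dsimp only
        rw [ih ((lo + hi) / 2 - lo) (by omega) l lo ((lo + hi) / 2) rfl hml (by omega),
            ih (hi - (lo + hi) / 2) (by omega) l ((lo + hi) / 2) hi rfl hmh hle]
        have hsplit : (l.drop lo).take (hi - lo) =
            (l.drop lo).take ((lo + hi) / 2 - lo) ++ (l.drop ((lo + hi) / 2)).take (hi - (lo + hi) / 2) := by
          have hd : l.drop ((lo + hi) / 2) = (l.drop lo).drop ((lo + hi) / 2 - lo) := by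
            rw [List.drop_drop]; congr 1; omega
          rw [hd, ← List.take_add]; congr 1; omega
        have ha : (l.drop lo).take ((lo + hi) / 2 - lo) ≠ [] := by
          simp [List.take_eq_nil_iff, List.drop_eq_nil_iff]; omega
        have hb : (l.drop ((lo + hi) / 2)).take (hi - (lo + hi) / 2) ≠ [] := by
          simp [List.take_eq_nil_iff, List.drop_eq_nil_iff]; omega
        rw [hsplit, minPreL_append _ _ ha hb]
        simp [sumDelta]

theorem loopA_iff : ∀ (m : List Char) (c : Char) (d : Int), 1 ≤ d →
    (mustTrimLoopA (c :: m) d = true ↔ 1 ≤ d + minPre c m) := by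
  intro m
  induction m with
  | nil =>
    intro c d hd
    have := pvDelta_mem c
    rw [loopA_cons]
    by_cases h : d + pvDelta c = 0
    · simp [h, minPre]
    · simp [h, mustTrimLoopA, minPre]; omega
  | cons e m' ih =>
    intro c d hd
    have := pvDelta_mem c
    rw [loopA_cons]
    by_cases h : d + pvDelta c = 0
    · simp [h, minPre]; omega
    · rw [if_neg h, ih e (d + pvDelta c) (by omega)]
      simp only [minPre]
      omega

theorem main_aux (t : List Char) : mustTrimLoopA ('(' :: t) 0 = decide (1 ≤ minPre '(' t) := by
  rw [loopA_cons]
  have h1 : (0 : Int) + pvDelta '(' = 1 := by simp [pvDelta]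
  rw [h1, if_neg (by omega)]
  cases t with
  | nil => simp [mustTrimLoopA, minPre, pvDelta]
  | cons f t' =>
    have hiff := loopA_iff t' f 1 (by omega)
    have hm : minPre '(' (f :: t') = min 1 (1 + minPre f t') := by simp [minPre, pvDelta]
    rw [hm]
    by_cases hp : 1 ≤ 1 + minPre f t'
    · rw [hiff.mpr hp]; symm; rw [decide_eq_true_iff]; omega
    · have hf : mustTrimLoopA (f :: t') 1 = false := by
        cases h' : mustTrimLoopA (f :: t') 1
        · rfl
        · exact absurd (hiff.mp h') hp
      rw [hf]; symm; rw [decide_eq_false_iff_not]; omega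

-- ===== VERDICT (by name: the statement is the Claim_ definition above) =====
theorem mustTrim_spec : Claim_equal_mustTrim := by
  intro string _ hpre
  unfold Spec_mustTrim mustTrim mustTrim_alt
  cases h : string.toList with
  | nil => rfl
  | cons c rest =>
    by_cases hc : c = '('
    · subst hc
      simp only [ne_eq, not_true_eq_false, if_false]
      cases rest with
      | nil => simp [mustTrimScan, mustTrimLoopA]
      | cons e r' =>
        have hlt : 0 < ('(' :: e :: r').length - 1 := by simp
        rw [scan_spec (('(' :: e :: r').length - 1) ('(' :: e :: r') 0 (('(' :: e :: r').length - 1)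
              rfl hlt (by omega)]
        have hl : ('(' :: e :: r').length - 1 = r'.length + 1 := by simp
        rw [hl]
        simp only [List.drop_zero, List.take_succ_cons, minPreL]
        exact main_aux _
    · simp [hc]
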